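-- pv_equiv track=rewrite | github.com/fedjaf123/Srb1.2 | srb_modules/import_common.py | format_missing_int_ranges
-- ===== SOURCE A (Python) =====
-- def format_missing_int_ranges(expected_start: int, present: set[int], expected_end: int) -> str:
--     if expected_end < expected_start:
--         return ""
--     missing = [n for n in range(expected_start, expected_end + 1) if n not in present]
--     if not missing:
--         return ""
--     ranges: list[tuple[int, int]] = []
--     cur_start = missing[0]
--     cur_end = missing[0]
--     for n in missing[1:]:
--         if n == cur_end + 1:
--             cur_end = n
--         else:
--             ranges.append((cur_start, cur_end))
--             cur_start = n
--             cur_end = n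
--     ranges.append((cur_start, cur_end))
--     parts = []
--     for a, b in ranges:
--         parts.append(str(a) if a == b else f"{a}-{b}")
--     return ", ".join(parts)
-- ===== SOURCE B (Python) =====
-- def format_missing_int_ranges(expected_start: int, present, expected_end: int) -> str:
--     qs = sorted({x for x in present if expected_start <= x <= expected_end})
--     parts = []
--     lo = expected_start
--     for q in qs:
--         if lo <= q - 1:
--             parts.append(str(lo) if lo == q - 1 else f"{lo}-{q - 1}")
--         lo = q + 1
--     if lo <= expected_end:
--         parts.append(str(lo) if lo == expected_end else f"{lo}-{expected_end}")
--     return ", ".join(parts)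
-- ===== Notes on version B (the rewrite author's own statement) =====
-- stated objective: alternative
-- what changed: Instead of materialising every integer of [start,end] and re-grouping the missing ones into runs, B sorts the distinct present values inside the range and emits each gap between consecutive present values (and the interval boundaries) directly.
import Mathlib
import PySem

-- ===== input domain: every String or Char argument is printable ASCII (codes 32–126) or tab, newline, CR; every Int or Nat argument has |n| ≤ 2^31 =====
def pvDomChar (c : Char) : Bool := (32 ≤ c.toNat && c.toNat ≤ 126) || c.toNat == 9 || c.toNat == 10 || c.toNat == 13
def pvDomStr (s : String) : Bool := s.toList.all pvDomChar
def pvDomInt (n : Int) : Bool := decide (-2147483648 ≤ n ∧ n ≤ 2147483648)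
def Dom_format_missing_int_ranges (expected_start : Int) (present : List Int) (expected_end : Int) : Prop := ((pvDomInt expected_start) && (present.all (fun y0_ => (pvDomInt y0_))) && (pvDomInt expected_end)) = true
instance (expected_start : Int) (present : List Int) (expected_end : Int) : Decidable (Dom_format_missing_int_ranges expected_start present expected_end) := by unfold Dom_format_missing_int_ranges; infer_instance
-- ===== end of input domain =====

-- B replaces A's scan of every integer of [start,end] by a sort of the present values
-- inside the range followed by one walk over the gaps between them (alternative algorithm).

-- ===== PORT A =====
-- 'str(a) if a == b else f"{a}-{b}"' — the identical formatting expression both Pythons use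
def pvFmt (a b : Int) : String :=
  if a = b then PySem.Int.toStr a else PySem.Int.toStr a ++ "-" ++ PySem.Int.toStr b

def format_missing_int_ranges (expected_start : Int) (present : List Int) (expected_end : Int) : String :=
  if expected_end < expected_start then "" else
  let missing := (PySem.List.pyRange expected_start (expected_end + 1) 1).filter
      (fun n => !(present.contains n))
  match missing with
  | [] => ""
  | m0 :: rest =>
    let st := rest.foldl
      (fun (acc : List (Int × Int) × Int × Int) n =>
        if n = acc.2.2 + 1 then (acc.1, acc.2.1, n)
        else (acc.1 ++ [(acc.2.1, acc.2.2)], n, n))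
      ([], m0, m0)
    let ranges := st.1 ++ [(st.2.1, st.2.2)]
    let parts := ranges.map (fun ab => pvFmt ab.1 ab.2)
    PySem.Str.join ", " parts

-- ===== PORT B =====
def format_missing_int_ranges_alt (expected_start : Int) (present : List Int) (expected_end : Int) : String :=
  let qs := PySem.List.sorted
      (PySem.Set.ofList (present.filter (fun x => expected_start ≤ x && x ≤ expected_end)))
      (fun x => x) false
  let st := qs.foldl
    (fun (acc : List String × Int) q =>
      let parts := if acc.2 ≤ q - 1 then acc.1 ++ [pvFmt acc.2 (q - 1)] else acc.1
      (parts, q + 1))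
    ([], expected_start)
  let parts := if st.2 ≤ expected_end then st.1 ++ [pvFmt st.2 expected_end] else st.1
  PySem.Str.join ", " parts

-- ===== PRECONDITION & SPEC =====
def Spec_format_missing_int_ranges (expected_start : Int) (present : List Int) (expected_end : Int) (out : String) : Prop := out = format_missing_int_ranges_alt expected_start present expected_end
instance (expected_start : Int) (present : List Int) (expected_end : Int) (out : String) : Decidable (Spec_format_missing_int_ranges expected_start present expected_end out) := by unfold Spec_format_missing_int_ranges; infer_instance

-- ===== CLAIM (what is proved, stated in full; the proofs are below) =====
def Claim_equal_format_missing_int_ranges : Prop := ∀ (expected_start : Int) (present : List Int) (expected_end : Int), Dom_format_missing_int_ranges expected_start present expected_end → Spec_format_missing_int_ranges expected_start present expected_end (format_missing_int_ranges expected_start present expected_end)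

-- ===== LEMMAS AND PROOFS =====

-- A's grouping loop, as structural recursion on the remaining missing values
def pvRunsA (t : List Int) (cs ce : Int) : List (Int × Int) :=
  match t with
  | [] => [(cs, ce)]
  | n :: t' => if n = ce + 1 then pvRunsA t' cs n else (cs, ce) :: pvRunsA t' n n

def pvRunsFull : List Int → List (Int × Int)
  | [] => []
  | m :: t => pvRunsA t m m

-- the gap list: intervals of [lo,e] strictly between the (sorted, distinct) qs
def pvGaps (lo : Int) (qs : List Int) (e : Int) : List (Int × Int) :=
  match qs with
  | [] => if lo ≤ e then [(lo, e)] else []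
  | q :: qs' => (if lo ≤ q - 1 then [(lo, q - 1)] else []) ++ pvGaps (q + 1) qs' e

theorem pvFoldA_eq_runsA (t : List Int) : ∀ (r : List (Int × Int)) (cs ce : Int),
    (let st := t.foldl
        (fun (acc : List (Int × Int) × Int × Int) n =>
          if n = acc.2.2 + 1 then (acc.1, acc.2.1, n)
          else (acc.1 ++ [(acc.2.1, acc.2.2)], n, n)) (r, cs, ce)
     st.1 ++ [(st.2.1, st.2.2)]) = r ++ pvRunsA t cs ce := by
  induction t with
  | nil => intro r cs ce; simp [pvRunsA]
  | cons n t ih =>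
    intro r cs ce
    simp only [List.foldl_cons, pvRunsA]
    by_cases h : n = ce + 1
    · simp [h, ih]
    · simp [h, ih]

theorem pvRunsA_contig (k : Nat) : ∀ (ce b : Int) (t : List Int) (cs : Int),
    k = (b - ce).toNat → ce ≤ b →
    pvRunsA (PySem.List.pyRange (ce + 1) (b + 1) 1 ++ t) cs ce = pvRunsA t cs b := by
  induction k with
  | zero =>
    intro ce b t cs hk hle
    have : b = ce := by omega
    subst this
    rw [PySem.List.pyRange_one_eq_nil (by omega)]
    simp
  | succ k ih =>
    intro ce b t cs hk hle
    have hlt : ce + 1 < b + 1 := by omega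
    rw [PySem.List.pyRange_one_cons hlt]
    simp only [List.cons_append, pvRunsA]
    exact ih (ce + 1) b t cs (by omega) (by omega)

theorem pvMem_missing {lo e : Int} {qs : List Int} {n : Int}
    (h : n ∈ (PySem.List.pyRange lo (e + 1) 1).filter (fun m => !(qs.contains m))) :
    lo ≤ n ∧ n ≤ e := by
  have := List.mem_filter.mp h
  have := (PySem.List.mem_pyRange_one).mp this.1
  omega

-- the core correspondence: grouping the missing values of [lo,e] into maximal runs
-- yields exactly the gaps between consecutive present values
theorem pvRuns_eq_gaps (qs : List Int) : ∀ (lo e : Int),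
    qs.Pairwise (· < ·) → (∀ q ∈ qs, lo ≤ q ∧ q ≤ e) →
    pvRunsFull ((PySem.List.pyRange lo (e + 1) 1).filter (fun n => !(qs.contains n)))
      = pvGaps lo qs e := by
  induction qs with
  | nil =>
    intro lo e _ _
    simp only [List.contains_eq_mem]
    rw [List.filter_eq_self.mpr (by intro a _; simp)]
    by_cases h : lo ≤ e
    · rw [PySem.List.pyRange_one_cons (by omega)]
      simp only [pvRunsFull, pvGaps, if_pos h]
      have := pvRunsA_contig (e - lo).toNat lo e [] lo rfl h
      simpa [pvRunsA] using this
    · rw [PySem.List.pyRange_one_eq_nil (by omega)]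
      simp [pvRunsFull, pvGaps, h]
  | cons q qs' ih =>
    intro lo e hpw hbd
    have hq := hbd q (by simp)
    have hqs' : ∀ x ∈ qs', q < x := by
      intro x hx; exact (List.pairwise_cons.mp hpw).1 x hx
    -- split the range at q
    obtain ⟨hq1, hq2⟩ := hq
    -- split the range at q
    have hcons_q : PySem.List.pyRange q (e + 1) 1 = q :: PySem.List.pyRange (q + 1) (e + 1) 1 :=
      PySem.List.pyRange_one_cons (by omega)
    have hsplit : PySem.List.pyRange lo (e + 1) 1
        = PySem.List.pyRange lo q 1 ++ q :: PySem.List.pyRange (q + 1) (e + 1) 1 := by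
      rw [PySem.List.pyRange_one_append lo q (e + 1) (by omega) (by omega), hcons_q]
    have hfl : (PySem.List.pyRange lo q 1).filter (fun n => !((q :: qs').contains n))
        = PySem.List.pyRange lo q 1 := by
      apply List.filter_eq_self.mpr
      intro a ha
      have := (PySem.List.mem_pyRange_one).mp ha
      simp only [List.contains_eq_mem, Bool.not_eq_eq_eq_not, Bool.not_true, decide_eq_false_iff_not]
      intro hmem
      rcases List.mem_cons.mp hmem with h | h
      · omega
      · exact absurd (hqs' a h) (by omega)
    have hfr : (PySem.List.pyRange (q + 1) (e + 1) 1).filter (fun n => !((q :: qs').contains n))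
        = (PySem.List.pyRange (q + 1) (e + 1) 1).filter (fun n => !(qs'.contains n)) := by
      apply List.filter_congr
      intro a ha
      have := (PySem.List.mem_pyRange_one).mp ha
      simp only [List.contains_eq_mem, List.mem_cons]
      have : a ≠ q := by omega
      simp [this]
    have hM : (PySem.List.pyRange lo (e + 1) 1).filter (fun n => !((q :: qs').contains n))
        = PySem.List.pyRange lo q 1
          ++ (PySem.List.pyRange (q + 1) (e + 1) 1).filter (fun n => !(qs'.contains n)) := by
      rw [hsplit, List.filter_append]
      simp only [List.filter_cons]
      rw [hfl, hfr]
      simp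
    have hIH := ih (q + 1) e (List.pairwise_cons.mp hpw).2
      (fun x hx => ⟨by have := hqs' x hx; omega, (hbd x (by simp [hx])).2⟩)
    rw [hM]
    by_cases hlo : lo ≤ q - 1
    · -- nonempty block [lo, q-1] before q
      have hcons_lo : PySem.List.pyRange lo q 1 = lo :: PySem.List.pyRange (lo + 1) q 1 :=
        PySem.List.pyRange_one_cons (by omega)
      rw [hcons_lo]
      simp only [pvRunsFull, List.cons_append]
      have hcontig := pvRunsA_contig (q - 1 - lo).toNat lo (q - 1)
        ((PySem.List.pyRange (q + 1) (e + 1) 1).filter (fun n => !(qs'.contains n))) lo rfl (by omega)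
      have heq : PySem.List.pyRange (lo + 1) ((q - 1) + 1) 1 = PySem.List.pyRange (lo + 1) q 1 := by
        norm_num
      rw [heq] at hcontig
      rw [hcontig]
      simp only [pvGaps, if_pos hlo, List.singleton_append]
      cases hMc : (PySem.List.pyRange (q + 1) (e + 1) 1).filter (fun n => !(qs'.contains n)) with
      | nil =>
        rw [hMc] at hIH
        simp only [pvRunsFull] at hIH
        simp [pvRunsA, ← hIH]
      | cons n t =>
        have hn : q + 1 ≤ n := (pvMem_missing (by rw [hMc]; simp)).1
        rw [hMc] at hIH
        simp only [pvRunsFull] at hIH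
        simp only [pvRunsA, if_neg (by omega : ¬ n = (q - 1) + 1)]
        rw [hIH]
    · -- lo = q : no gap before q
      have : lo = q := by omega
      subst this
      rw [PySem.List.pyRange_one_eq_nil (by omega)]
      simp only [List.nil_append, pvGaps, if_neg hlo, List.nil_append]
      exact hIH

-- B's fold builds exactly the formatted gap list
theorem pvFoldB_eq_gaps (qs : List Int) : ∀ (lo e : Int) (r : List String),
    (let st := qs.foldl
        (fun (acc : List String × Int) q =>
          let parts := if acc.2 ≤ q - 1 then acc.1 ++ [pvFmt acc.2 (q - 1)] else acc.1
          (parts, q + 1)) (r, lo)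
     if st.2 ≤ e then st.1 ++ [pvFmt st.2 e] else st.1)
    = r ++ (pvGaps lo qs e).map (fun ab => pvFmt ab.1 ab.2) := by
  induction qs with
  | nil =>
    intro lo e r
    by_cases h : lo ≤ e <;> simp [pvGaps, h]
  | cons q qs' ih =>
    intro lo e r
    simp only [List.foldl_cons, pvGaps, List.map_append]
    by_cases h : lo ≤ q - 1
    · simp only [if_pos h]
      rw [ih (q + 1) e (r ++ [pvFmt lo (q - 1)])]
      simp
    · simp only [if_neg h]
      rw [ih (q + 1) e r]
      simp

-- membership in B's sorted distinct filtered list, for range elements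
theorem pvContains_eq (present : List Int) (lo e n : Int) (hn : lo ≤ n) (hne : n ≤ e)
    (hrange : ∀ x, x ∈ (present.filter (fun x => lo ≤ x && x ≤ e)) ↔
        (lo ≤ x ∧ x ≤ e ∧ x ∈ present)) :
    ((PySem.List.sorted (PySem.Set.ofList (present.filter (fun x => lo ≤ x && x ≤ e)))
        (fun x => x) false).contains n) = present.contains n := by
  simp only [List.contains_eq_mem, decide_eq_decide]
  rw [PySem.List.mem_sorted, PySem.Set.mem_ofList, hrange n]
  constructor
  · exact fun h => h.2.2
  · exact fun h => ⟨hn, hne, h⟩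

theorem format_missing_eq (expected_start : Int) (present : List Int) (expected_end : Int) :
    format_missing_int_ranges expected_start present expected_end
      = format_missing_int_ranges_alt expected_start present expected_end := by
  set s := expected_start
  set e := expected_end
  set qs := PySem.List.sorted
      (PySem.Set.ofList (present.filter (fun x => s ≤ x && x ≤ e))) (fun x => x) false with hqs
  have hrng : ∀ x, x ∈ (present.filter (fun x => s ≤ x && x ≤ e)) ↔
      (s ≤ x ∧ x ≤ e ∧ x ∈ present) := by
    intro x
    simp only [List.mem_filter, Bool.and_eq_true, decide_eq_true_eq]
    tauto
  have hpw : qs.Pairwise (· < ·) := PySem.List.sorted_ofList_pairwise_lt _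
  have hbd : ∀ q ∈ qs, s ≤ q ∧ q ≤ e := by
    intro q hq
    rw [hqs, PySem.List.mem_sorted, PySem.Set.mem_ofList, hrng q] at hq
    exact ⟨hq.1, hq.2.1⟩
  -- A's filter over 'present' equals the filter over qs, on the range
  have hfilter : (PySem.List.pyRange s (e + 1) 1).filter (fun n => !(present.contains n))
      = (PySem.List.pyRange s (e + 1) 1).filter (fun n => !(qs.contains n)) := by
    apply List.filter_congr
    intro n hn
    have := (PySem.List.mem_pyRange_one).mp hn
    rw [pvContains_eq present s e n this.1 (by omega) hrng]
  -- B側: rewrite B into the joined gap list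
  have hB : format_missing_int_ranges_alt s present e
      = PySem.Str.join ", " ((pvGaps s qs e).map (fun ab => pvFmt ab.1 ab.2)) := by
    unfold format_missing_int_ranges_alt
    rw [← hqs]
    have := pvFoldB_eq_gaps qs s e []
    simp only [List.nil_append] at this
    simp only []
    rw [this]
  have hruns := pvRuns_eq_gaps qs s e hpw hbd
  unfold format_missing_int_ranges
  rw [hB]
  by_cases hse : e < s
  · -- empty interval: qs = [] and no gaps
    have hfnil : present.filter (fun x => s ≤ x && x ≤ e) = [] := by
      rw [List.filter_eq_nil_iff]
      intro x _
      simp only [Bool.and_eq_true, decide_eq_true_eq, not_and]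
      omega
    have hqnil : qs = [] := by
      rw [hqs, hfnil]
      rfl
    rw [if_pos hse, hqnil]
    simp [pvGaps, show ¬ s ≤ e by omega, PySem.Str.join]
  · rw [if_neg hse]
    simp only [hfilter]
    cases hm : (PySem.List.pyRange s (e + 1) 1).filter (fun n => !(qs.contains n)) with
    | nil =>
      rw [hm] at hruns
      simp only [pvRunsFull] at hruns
      rw [← hruns]
      simp [PySem.Str.join]
    | cons m0 rest =>
      rw [hm] at hruns
      simp only [pvRunsFull] at hruns
      simp only []
      rw [pvFoldA_eq_runsA rest [] m0 m0]
      simp only [List.nil_append]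
      rw [hruns]
-- ===== VERDICT (by name: the statement is the Claim_ definition above) =====
theorem format_missing_int_ranges_spec : Claim_equal_format_missing_int_ranges := by
  intro s present e _
  unfold Spec_format_missing_int_ranges
  exact format_missing_eq s present e
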